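-- pv_equiv track=rewrite | github.com/TomLouwers/websitesara | tools/new/kerndoel_coverage_dashboard.py | parse_pack_meta
-- ===== SOURCE A (Python) =====
-- from typing import Dict, List, Any, Tuple
--
-- def parse_pack_meta(path: str) -> Dict[str, Any]:
--     p = path.replace("\\", "/")
--     parts = p.split("/")
--
--     meta = {
--         "path": path,
--         "domain": "",
--         "grade": None,
--         "level": "",
--         "topic": ""
--     }
--
--     if "nl-NL" in parts:
--         i = parts.index("nl-NL")
--         if i + 1 < len(parts):
--             meta["domain"] = parts[i + 1]
--
--     for part in parts:
--         if part.startswith("groep-"):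
--             try:
--                 meta["grade"] = int(part.split("-")[1])
--             except Exception:
--                 meta["grade"] = None
--         if part in ("n1", "n2", "n3", "n4"):
--             meta["level"] = part
--
--     if "topics" in parts:
--         j = parts.index("topics")
--         if j + 1 < len(parts):
--             meta["topic"] = parts[j + 1]
--
--     return meta
-- ===== SOURCE B (Python) =====
-- def parse_pack_meta(path: str) -> dict:
--     # single forward pass with an accumulator: remember the previous part and
--     # first-occurrence flags instead of A's separate .index lookups and loop
--     parts = path.replace("\\", "/").split("/")
--     prev = None
--     domain = ""
--     topic = ""
--     grade = None
--     level = ""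
--     dset = False
--     tset = False
--     for part in parts:
--         if not dset and prev == "nl-NL":
--             domain = part
--             dset = True
--         if not tset and prev == "topics":
--             topic = part
--             tset = True
--         if part.startswith("groep-"):
--             try:
--                 grade = int(part.split("-")[1])
--             except Exception:
--                 grade = None
--         if part in ("n1", "n2", "n3", "n4"):
--             level = part
--         prev = part
--     return {"path": path, "domain": domain, "grade": grade, "level": level, "topic": topic}
-- ===== Notes on version B (the rewrite author's own statement) =====
-- stated objective: alternative
-- what changed: A's staged passes (two 'in'+'.index' lookups into the part list plus a separate overwriting loop mutating a dict) are replaced by ONE forward pass with an explicit accumulator: a previous-part variable and first-occurrence flags set domain/topic, while grade/level are overwritten in the same pass; the result dict is built once at the end.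
import Mathlib
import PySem

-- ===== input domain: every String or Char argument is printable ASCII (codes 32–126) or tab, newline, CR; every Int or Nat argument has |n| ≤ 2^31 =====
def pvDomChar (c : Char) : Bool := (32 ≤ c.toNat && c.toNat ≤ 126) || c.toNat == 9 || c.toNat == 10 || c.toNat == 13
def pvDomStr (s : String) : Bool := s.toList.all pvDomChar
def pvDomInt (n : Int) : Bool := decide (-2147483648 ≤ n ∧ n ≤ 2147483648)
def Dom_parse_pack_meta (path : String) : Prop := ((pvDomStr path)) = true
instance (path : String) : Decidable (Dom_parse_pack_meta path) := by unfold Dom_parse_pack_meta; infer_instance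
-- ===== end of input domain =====

-- B replaces A's staged passes (two index lookups plus an overwriting loop over a mutated dict)
-- by ONE forward pass with an explicit accumulator (previous part + first-occurrence flags);
-- alternative decomposition, same cost. Return-value equivalence only; neither mutates anything.

-- ===== PORT A =====
-- s.split("/") and part.split("-"): sep ≠ "", so PySem.Str.split? is some and .getD [] is exact.
-- A's dict holds strings and an int grade; the int is rendered with PySem.Int.toStr to fit the
-- declared value type Option String (B renders it identically).
def parse_pack_meta (path : String) : List (String × Option String) :=
  let p := PySem.Str.replace path "\\" "/"
  let parts := (PySem.Str.split? p "/").getD []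
  let md : PySem.Dict String (Option String) :=
    PySem.Dict.mk [("path", some path), ("domain", some ""), ("grade", none),
                   ("level", some ""), ("topic", some "")]
  -- if "nl-NL" in parts: i = parts.index("nl-NL"); if i+1 < len(parts): md["domain"] = parts[i+1]
  let md := match PySem.List.index? parts "nl-NL" with
    | some i => if i + 1 < parts.length then md.insert "domain" (some (parts.getD (i + 1) "")) else md
    | none => md
  let md := parts.foldl (fun m part =>
      let m := if PySem.Str.startswith part "groep-" then
          m.insert "grade" (((PySem.List.pyGet? ((PySem.Str.split? part "-").getD []) 1).bind
            PySem.Int.ofStr?).map PySem.Int.toStr)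
        else m
      if part == "n1" || part == "n2" || part == "n3" || part == "n4" then
        m.insert "level" (some part) else m) md
  let md := match PySem.List.index? parts "topics" with
    | some j => if j + 1 < parts.length then md.insert "topic" (some (parts.getD (j + 1) "")) else md
    | none => md
  md.items

-- ===== PORT B =====
-- the loop body of Source B: state = (prev, domain, dset, topic, tset, grade, level)
def stepB (st : Option String × String × Bool × String × Bool × Option String × String)
    (part : String) : Option String × String × Bool × String × Bool × Option String × String :=
  let (prev, dom, dset, top, tset, gr, lv) := st
  let (dom, dset) := if !dset && prev == some "nl-NL" then (part, true) else (dom, dset)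
  let (top, tset) := if !tset && prev == some "topics" then (part, true) else (top, tset)
  let gr := if PySem.Str.startswith part "groep-" then
      ((PySem.List.pyGet? ((PySem.Str.split? part "-").getD []) 1).bind
        PySem.Int.ofStr?).map PySem.Int.toStr
    else gr
  let lv := if part == "n1" || part == "n2" || part == "n3" || part == "n4" then part else lv
  (some part, dom, dset, top, tset, gr, lv)

def parse_pack_meta_alt (path : String) : List (String × Option String) :=
  let parts := (PySem.Str.split? (PySem.Str.replace path "\\" "/") "/").getD []
  let st := parts.foldl stepB (none, "", false, "", false, none, "")
  match st with
  | (_, dom, _, top, _, gr, lv) =>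
    [("path", some path), ("domain", some dom), ("grade", gr),
     ("level", some lv), ("topic", some top)]

-- ===== PRECONDITION & SPEC =====
def Spec_parse_pack_meta (path : String) (out : List (String × Option String)) : Prop :=
  out = parse_pack_meta_alt path
instance (path : String) (out : List (String × Option String)) : Decidable (Spec_parse_pack_meta path out) := by
  unfold Spec_parse_pack_meta; infer_instance

-- ===== CLAIM =====
def Claim_equal_parse_pack_meta : Prop :=
  ∀ (path : String), Dom_parse_pack_meta path → Spec_parse_pack_meta path (parse_pack_meta path)

-- ===== LEMMAS AND PROOFS =====

-- value following the first occurrence of key, scanning with a carried previous element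
def fstAfter (key : String) : Option String → List String → Option String
  | _, [] => none
  | prev, c :: rs => if prev == some key then some c else fstAfter key (some c) rs

lemma pv_insert_grade (a b c d e v : Option String) :
    (PySem.Dict.mk [("path", a), ("domain", b), ("grade", c), ("level", d), ("topic", e)]).insert
      "grade" v
    = PySem.Dict.mk [("path", a), ("domain", b), ("grade", v), ("level", d), ("topic", e)] := by
  simp [PySem.Dict.insert]

lemma pv_insert_level (a b c d e v : Option String) :
    (PySem.Dict.mk [("path", a), ("domain", b), ("grade", c), ("level", d), ("topic", e)]).insert
      "level" v
    = PySem.Dict.mk [("path", a), ("domain", b), ("grade", c), ("level", v), ("topic", e)] := by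
  simp [PySem.Dict.insert]

lemma pv_insert_domain (a b c d e v : Option String) :
    (PySem.Dict.mk [("path", a), ("domain", b), ("grade", c), ("level", d), ("topic", e)]).insert
      "domain" v
    = PySem.Dict.mk [("path", a), ("domain", v), ("grade", c), ("level", d), ("topic", e)] := by
  simp [PySem.Dict.insert]

lemma pv_insert_topic (a b c d e v : Option String) :
    (PySem.Dict.mk [("path", a), ("domain", b), ("grade", c), ("level", d), ("topic", e)]).insert
      "topic" v
    = PySem.Dict.mk [("path", a), ("domain", b), ("grade", c), ("level", d), ("topic", v)] := by
  simp [PySem.Dict.insert]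

-- one pass = the tuple of A's separate scans
lemma loopB_eq (rest : List String) (prev : Option String) (dom top : String)
    (dset tset : Bool) (gr : Option String) (lv : String) :
    List.foldl stepB (prev, dom, dset, top, tset, gr, lv) rest =
      (rest.foldl (fun _ x => some x) prev,
       if dset then dom else (fstAfter "nl-NL" prev rest).getD dom,
       dset || (fstAfter "nl-NL" prev rest).isSome,
       if tset then top else (fstAfter "topics" prev rest).getD top,
       tset || (fstAfter "topics" prev rest).isSome,
       rest.foldl (fun g part =>
         if PySem.Str.startswith part "groep-" then
           ((PySem.List.pyGet? ((PySem.Str.split? part "-").getD []) 1).bind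
             PySem.Int.ofStr?).map PySem.Int.toStr
         else g) gr,
       rest.foldl (fun l part =>
         if part == "n1" || part == "n2" || part == "n3" || part == "n4" then part else l) lv) := by
  induction rest generalizing prev dom top dset tset gr lv with
  | nil => simp [fstAfter]
  | cons c rs ih =>
    simp only [List.foldl_cons, stepB, fstAfter]
    by_cases hd : prev = some "nl-NL" <;> by_cases ht : prev = some "topics" <;>
      cases dset <;> cases tset <;>
      simp [hd, ht, ih]

lemma fstAfter_some_eq (key : String) (c : String) (rest : List String) :
    (fstAfter key (some c) rest).getD ""
      = (match PySem.List.index? (c :: rest) key with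
          | some i => if i + 1 < (c :: rest).length then (c :: rest).getD (i + 1) "" else ""
          | none => "") := by
  induction rest generalizing c with
  | nil =>
    by_cases h : c = key
    · subst h; rw [PySem.List.index?_cons_self]; simp [fstAfter]
    · rw [PySem.List.index?_cons_of_ne _ h]
      simp [fstAfter, PySem.List.index?, List.idxOf?]
  | cons d rs ih =>
    by_cases h : c = key
    · subst h; rw [PySem.List.index?_cons_self]; simp [fstAfter]
    · rw [PySem.List.index?_cons_of_ne _ h]
      simp only [fstAfter, beq_iff_eq, Option.some.injEq, h, if_false]
      rw [ih]
      cases hI : PySem.List.index? (d :: rs) key <;> simp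

lemma fstAfter_none_eq (key : String) (parts : List String) :
    (fstAfter key none parts).getD ""
      = (match PySem.List.index? parts key with
          | some i => if i + 1 < parts.length then parts.getD (i + 1) "" else ""
          | none => "") := by
  cases parts with
  | nil => rfl
  | cons c rs =>
    have : fstAfter key none (c :: rs) = fstAfter key (some c) rs := by simp [fstAfter]
    rw [this, fstAfter_some_eq]

lemma foldA_eq (parts : List String) (a b e g : Option String) (l : Option String) :
    parts.foldl (fun m part =>
      if part == "n1" || part == "n2" || part == "n3" || part == "n4" then
        (if PySem.Str.startswith part "groep-" then
          m.insert "grade" (((PySem.List.pyGet? ((PySem.Str.split? part "-").getD []) 1).bind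
            PySem.Int.ofStr?).map PySem.Int.toStr)
         else m).insert "level" (some part)
      else
        (if PySem.Str.startswith part "groep-" then
          m.insert "grade" (((PySem.List.pyGet? ((PySem.Str.split? part "-").getD []) 1).bind
            PySem.Int.ofStr?).map PySem.Int.toStr)
         else m))
      (PySem.Dict.mk [("path", a), ("domain", b), ("grade", g), ("level", l), ("topic", e)])
    = PySem.Dict.mk [("path", a), ("domain", b),
        ("grade", parts.foldl (fun g part =>
          if PySem.Str.startswith part "groep-" then
            ((PySem.List.pyGet? ((PySem.Str.split? part "-").getD []) 1).bind
              PySem.Int.ofStr?).map PySem.Int.toStr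
          else g) g),
        ("level", parts.foldl (fun l part =>
          if part == "n1" || part == "n2" || part == "n3" || part == "n4" then some part else l)
          l), ("topic", e)] := by
  induction parts generalizing g l with
  | nil => rfl
  | cons p rest ih =>
    simp only [List.foldl_cons]
    split_ifs with h1 h2 <;>
      (try simp only [pv_insert_grade, pv_insert_level]) <;>
      exact ih _ _

lemma levelFold_some (parts : List String) (s : String) :
    parts.foldl (fun l part =>
      if part == "n1" || part == "n2" || part == "n3" || part == "n4" then some part else l)
      (some s) = some (parts.foldl (fun l part =>
      if part == "n1" || part == "n2" || part == "n3" || part == "n4" then part else l) s) := by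
  induction parts generalizing s with
  | nil => rfl
  | cons p rest ih =>
    simp only [List.foldl_cons]
    split_ifs <;> apply ih

-- ===== VERDICT =====
theorem parse_pack_meta_spec : Claim_equal_parse_pack_meta := by
  intro path _
  unfold Spec_parse_pack_meta parse_pack_meta parse_pack_meta_alt
  simp only [loopB_eq, fstAfter_none_eq]
  generalize (PySem.Str.split? (PySem.Str.replace path "\\" "/") "/").getD [] = parts
  cases hD : PySem.List.index? parts "nl-NL" <;>
    cases hT : PySem.List.index? parts "topics" <;>
      simp only [hD, hT] <;>
      (try split_ifs) <;>
      simp only [pv_insert_domain, foldA_eq, levelFold_some, pv_insert_topic,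
        Bool.false_eq_true] <;> (try contradiction)
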